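-- pv_equiv track=rewrite | github.com/hsn8086/exam | codeforces/ungrouped/B_Substring_and_Subsequence.py | check
-- ===== SOURCE A (Python) =====
-- def check(s: str, sub: str):
--     idx = 0
--
--     for l, c in enumerate(sub):
--         i = s.find(c, idx)
--
--         if i == -1:
--             return len(sub) - l
--         idx = i + 1
--     else:
--         return 0
-- ===== SOURCE B (Python) =====
-- def check(s: str, sub: str):
--     p = 0
--     for c in s:
--         if p < len(sub) and c == sub[p]:
--             p += 1
--     return len(sub) - p
-- ===== Notes on version B (the rewrite author's own statement) =====
-- stated objective: idiomatic
-- what changed: Replaces the loop over sub with repeated s.find(c, idx) calls by a single forward scan over s that advances a pointer into sub and returns len(sub) - pointer.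
import Mathlib
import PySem

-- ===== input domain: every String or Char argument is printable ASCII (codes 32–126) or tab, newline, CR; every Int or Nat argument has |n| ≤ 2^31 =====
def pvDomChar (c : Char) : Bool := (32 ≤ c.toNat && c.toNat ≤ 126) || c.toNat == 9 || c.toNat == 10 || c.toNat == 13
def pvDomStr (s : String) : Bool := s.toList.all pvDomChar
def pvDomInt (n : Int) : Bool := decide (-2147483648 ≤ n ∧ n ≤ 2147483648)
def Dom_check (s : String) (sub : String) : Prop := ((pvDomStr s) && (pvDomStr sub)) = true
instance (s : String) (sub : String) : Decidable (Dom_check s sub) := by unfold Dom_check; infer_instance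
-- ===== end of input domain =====

-- B replaces A's loop over sub with repeated s.find(c, idx) by a single forward scan
-- over s advancing a pointer into sub (objective: idiomatic).

-- ===== PORT A =====
-- for l, c in enumerate(sub): i = s.find(c, idx); if i == -1: return len(sub) - l; idx = i + 1
def checkGo (sL : List Char) (subLen : Int) : List (Int × Char) → Int → Int
  | [], _ => 0
  | (l, c) :: rest, idx =>
    let i := PySem.Chars.findFrom sL [c] idx
    if i = -1 then subLen - l else checkGo sL subLen rest (i + 1)

def check (s : String) (sub : String) : Int :=
  checkGo s.toList (sub.toList.length : Int) (PySem.List.enumerate sub.toList 0) 0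

-- ===== PORT B =====
-- p = 0; for c in s: if p < len(sub) and c == sub[p]: p += 1; return len(sub) - p
def check_alt (s : String) (sub : String) : Int :=
  (sub.toList.length : Int) -
    ((s.toList.foldl
      (fun p c => if p < sub.toList.length ∧ sub.toList[p]? = some c then p + 1 else p)
      (0 : Nat) : Nat) : Int)

-- ===== PRECONDITION & SPEC =====
def Spec_check (s : String) (sub : String) (out : Int) : Prop := out = check_alt s sub
instance (s : String) (sub : String) (out : Int) : Decidable (Spec_check s sub out) := by unfold Spec_check; infer_instance

-- ===== CLAIM (what is proved, stated in full; the proofs are below) =====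
def Claim_equal_check : Prop := ∀ (s : String) (sub : String), Dom_check s sub → Spec_check s sub (check s sub)

-- ===== LEMMAS AND PROOFS =====

-- greedy leftover of sub after scanning s
def g : List Char → List Char → List Char
  | _, [] => []
  | [], cs => cs
  | x :: t, c :: cs => if x = c then g t cs else g t (c :: cs)

theorem g_nil_right (t : List Char) : g t [] = [] := by cases t <;> rfl

theorem g_nil_left_len (cs : List Char) : (g [] cs).length = cs.length := by
  cases cs <;> rfl

theorem g_cons_cons (x c : Char) (t cs : List Char) :
    g (x :: t) (c :: cs) = if x = c then g t cs else g t (c :: cs) := rfl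

theorem len_g_le (t cs : List Char) : (g t cs).length ≤ cs.length := by
  induction t generalizing cs with
  | nil => cases cs <;> simp [g]
  | cons x t ih =>
    cases cs with
    | nil => simp [g_nil_right]
    | cons c cs =>
      rw [g_cons_cons]
      split
      · exact le_trans (ih cs) (Nat.le_succ _)
      · exact ih (c :: cs)

theorem g_not_mem (c : Char) (t cs : List Char) (h : c ∉ t) : g t (c :: cs) = c :: cs := by
  induction t with
  | nil => rfl
  | cons x t ih =>
    rw [g_cons_cons, if_neg (by rintro rfl; exact h (List.mem_cons_self))]
    exact ih (fun hm => h (List.mem_cons_of_mem _ hm))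

theorem g_skip_match (c : Char) (t u cs : List Char) (h : c ∉ t) :
    g (t ++ c :: u) (c :: cs) = g u cs := by
  induction t with
  | nil => simp [g_cons_cons]
  | cons x t ih =>
    rw [List.cons_append, g_cons_cons, if_neg (by rintro rfl; exact h (List.mem_cons_self))]
    exact ih (fun hm => h (List.mem_cons_of_mem _ hm))

theorem singleton_infix_iff (c : Char) (t : List Char) : [c] <:+: t ↔ c ∈ t := by
  constructor
  · intro h; exact h.sublist.mem (List.mem_singleton_self c)
  · intro h
    obtain ⟨u, v, rfl⟩ := List.append_of_mem h
    exact ⟨u, v, by simp⟩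

theorem checkGo_eq (sL : List Char) (subLen : Int) :
    ∀ (cs : List Char) (l : Int) (k : Nat), k ≤ sL.length → l + (cs.length : Int) = subLen →
    checkGo sL subLen (PySem.List.enumerate cs l) (k : Int)
      = ((g (sL.drop k) cs).length : Int) := by
  intro cs
  induction cs with
  | nil =>
    intro l k hk hl
    simp [PySem.List.enumerate, checkGo, g_nil_right]
  | cons c rest ih =>
    intro l k hk hl
    rw [PySem.List.enumerate_cons, checkGo,
      PySem.Chars.findFrom_natCast sL [c] k hk]
    set t := sL.drop k with ht
    by_cases hf : PySem.Chars.find t [c] = -1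
    · rw [if_pos (by simp [hf])]
      have hcm : c ∉ t := by
        have := (PySem.Chars.find_eq_neg_one_iff t [c]).mp hf
        exact fun h => this ((singleton_infix_iff c t).mpr h)
      rw [g_not_mem c t rest hcm]
      simp at hl ⊢
      omega
    · have hf0 : 0 ≤ PySem.Chars.find t [c] := by
        have := PySem.Chars.neg_one_le_find t [c]
        omega
      rw [if_neg hf, if_neg (by omega)]
      obtain ⟨hpre, hmin⟩ := PySem.Chars.find_spec hf0
      set jn := (PySem.Chars.find t [c]).toNat with hjn
      -- t.drop jn = c :: t.drop (jn + 1)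
      obtain ⟨r, hr⟩ := hpre
      have hdropjn : List.drop jn t = c :: r := by simpa using hr.symm
      have hjnlt : jn < t.length := by
        have := congrArg List.length hdropjn
        simp at this
        omega
      have hr' : List.drop (jn + 1) t = r := by
        have : List.drop 1 (List.drop jn t) = List.drop (jn + 1) t := by
          rw [List.drop_drop]
        simpa [hdropjn] using this.symm
      -- c not in t.take jn
      have hnm : c ∉ List.take jn t := by
        intro hm
        obtain ⟨m, hmlen, hme⟩ := List.getElem_of_mem hm
        have hmlt : m < jn := by simpa using lt_of_lt_of_le hmlen (by simp)
        have hmlt' : m < t.length := by omega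
        have : [c] <+: List.drop m t := by
          rw [List.drop_eq_getElem_cons hmlt']
          refine ⟨List.drop (m + 1) t, ?_⟩
          simp [← hme, List.getElem_take]
        exact hmin m hmlt this
      -- decompose t and apply g_skip_match
      have hteq : List.take jn t ++ c :: List.drop (jn + 1) t = t := by
        rw [hr', ← hdropjn, List.take_append_drop]
      have hg : g t (c :: rest) = g (List.drop (jn + 1) t) rest := by
        conv_lhs => rw [← hteq]
        exact g_skip_match c _ _ rest hnm
      have hklen : k + jn + 1 ≤ sL.length := by
        have : t.length = sL.length - k := by simp [ht]
        omega
      have hdrop2 : List.drop (k + jn + 1) sL = List.drop (jn + 1) t := by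
        rw [ht, List.drop_drop]
        ring_nf
      have := ih (l + 1) (k + jn + 1) hklen (by push_cast [List.length_cons] at hl ⊢; omega)
      rw [show (k : Int) + PySem.Chars.find t [c] + 1 = ((k + jn + 1 : Nat) : Int) by push_cast; omega]
      rw [this, hdrop2, hg]

theorem foldl_ptr (subL : List Char) :
    ∀ (sL : List Char) (p : Nat), p ≤ subL.length →
    sL.foldl (fun p c => if p < subL.length ∧ subL[p]? = some c then p + 1 else p) p
      = subL.length - (g sL (subL.drop p)).length := by
  intro sL
  induction sL with
  | nil =>
    intro p hp
    simp [g_nil_left_len]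
    omega
  | cons x sL ih =>
    intro p hp
    rw [List.foldl_cons]
    by_cases h : p < subL.length ∧ subL[p]? = some x
    · rw [if_pos h]
      have hget : subL[p] = x := by
        have := h.2
        rwa [List.getElem?_eq_getElem h.1, Option.some_inj] at this
      have hdrop : List.drop p subL = x :: List.drop (p + 1) subL := by
        rw [List.drop_eq_getElem_cons h.1, hget]
      rw [ih (p + 1) (by omega), hdrop, g_cons_cons, if_pos rfl]
    · rw [if_neg h]
      rcases Nat.lt_or_ge p subL.length with hlt | hge
      · have hdrop : List.drop p subL = subL[p] :: List.drop (p + 1) subL :=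
          List.drop_eq_getElem_cons hlt
        have hne : x ≠ subL[p] := by
          rintro rfl
          exact h ⟨hlt, List.getElem?_eq_getElem hlt⟩
        rw [ih p hp, hdrop, g_cons_cons, if_neg hne]
      · have hdrop : List.drop p subL = [] := List.drop_eq_nil_of_le hge
        rw [ih p hp, hdrop, g_nil_right, g_nil_right]

-- ===== VERDICT (by name: the statement is the Claim_ definition above) =====
theorem check_spec : Claim_equal_check := by
  intro s sub _
  unfold Spec_check check check_alt
  have hA := checkGo_eq s.toList (sub.toList.length : Int) sub.toList 0 0
    (Nat.zero_le _) (by simp)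
  simp only [Nat.cast_zero, List.drop_zero] at hA
  rw [hA, foldl_ptr sub.toList s.toList 0 (Nat.zero_le _), List.drop_zero]
  have hle := len_g_le s.toList sub.toList
  omega
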